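-- pv_equiv track=rewrite | github.com/Relaxe111/cdc-pipeline-generator | cdc_generator/helpers/helpers_mssql.py | generate_insert_values
-- ===== SOURCE A (Python) =====
-- from typing import Any, cast
--
-- def get_value_for_type(field_type: str, col_name: str, prefix: str = 'CDCTest') -> str:
--     """Generate appropriate test value for given SQL field type"""
--     field_type = field_type.upper()
--
--     if 'VARCHAR' in field_type or 'NVARCHAR' in field_type or 'CHAR' in field_type:
--         return f"'{prefix}_{col_name}'"
--     if 'INT' in field_type or 'NUMERIC' in field_type or 'DECIMAL' in field_type:
--         return '1'
--     if 'BIT' in field_type: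
--         return '0'
--     if 'DATETIME' in field_type or 'DATE' in field_type:
--         return 'GETDATE()'
--     return 'NULL'
--
-- def generate_insert_values(table_def: dict[str, Any], pk_cols: list[str], insert_cols: list[str],
--                           first_pk_is_identity: bool, test_id_base: int, num_records: int,
--                           prefix: str = 'CDCTest') -> tuple[list[str], int | None, int | None]:
--     """
--     Generate value sets for INSERT statements.
--     Handles both adopus-db-schema format (columns) and generated format (fields).
--
--     Returns:
--         all_value_sets: List of value tuples as strings
--         first_pk_val: First PK value (for non-IDENTITY PKs)
--         last_pk_val: Last PK value (for non-IDENTITY PKs)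
--     """
--     all_value_sets: list[str] = []
--     first_pk_val: int | None = None
--     last_pk_val: int | None = None
--
--     raw_fields = table_def.get('fields') or table_def.get('columns', [])
--     fields_list: list[dict[str, Any]] = cast(list[dict[str, Any]], raw_fields if isinstance(raw_fields, list) else [])
--
--     for record_num in range(num_records):
--         test_id: int = test_id_base + record_num
--         record_vals: list[str] = []
--
--         if first_pk_is_identity:
--             # Generate values for non-PK columns only
--             for col_name in insert_cols:
--                 for field in fields_list:
--                     field_name: str = str(field.get('mssql') or field.get('name') or '')
--                     if field_name == col_name:
--                         field_type: str = str(field.get('type', ''))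
--                         record_vals.append(get_value_for_type(field_type, col_name, prefix))
--                         break
--         else:
--             # Generate values including PK columns
--             for col_name in insert_cols:
--                 if col_name in pk_cols:
--                     # PK value
--                     pk_idx: int = pk_cols.index(col_name)
--                     for field in fields_list:
--                         field_name = str(field.get('mssql') or field.get('name') or '')
--                         if field_name == col_name:
--                             field_type = str(field.get('type', ''))
--                             if 'VARCHAR' in field_type.upper() or 'NVARCHAR' in field_type.upper():
--                                 val: str = f"'{prefix}_{record_num}_{pk_idx}'" if pk_idx > 0 else f"'{prefix}_{record_num}'"
--                                 record_vals.append(val)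
--                             else:
--                                 val_int: int = test_id + pk_idx if pk_idx > 0 else test_id
--                                 record_vals.append(str(val_int))
--                                 if pk_idx == 0:
--                                     if record_num == 0:
--                                         first_pk_val = val_int
--                                     if record_num == num_records - 1:
--                                         last_pk_val = val_int
--                             break
--                 else:
--                     # Non-PK value
--                     for field in fields_list:
--                         field_name = str(field.get('mssql') or field.get('name') or '')
--                         if field_name == col_name:
--                             field_type = str(field.get('type', ''))
--                             record_vals.append(get_value_for_type(field_type, col_name, prefix))
--                             break
--
--         all_value_sets.append(f"({', '.join(record_vals)})")
--
--     return all_value_sets, first_pk_val, last_pk_val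
-- ===== SOURCE B (Python) =====
-- def get_value_for_type(field_type: str, col_name: str, prefix: str = 'CDCTest') -> str:
--     field_type = field_type.upper()
--     if 'VARCHAR' in field_type or 'NVARCHAR' in field_type or 'CHAR' in field_type:
--         return f"'{prefix}_{col_name}'"
--     if 'INT' in field_type or 'NUMERIC' in field_type or 'DECIMAL' in field_type:
--         return '1'
--     if 'BIT' in field_type:
--         return '0'
--     if 'DATETIME' in field_type or 'DATE' in field_type:
--         return 'GETDATE()'
--     return 'NULL'
--
--
-- def _resolve_type(fields_list, col_name):
--     """First field whose mssql/name matches col_name; its type, else None."""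
--     for field in fields_list:
--         if str(field.get('mssql') or field.get('name') or '') == col_name:
--             return str(field.get('type', ''))
--     return None
--
--
-- def _build_specs(fields_list, pk_cols, insert_cols, first_pk_is_identity, prefix):
--     """One pass over insert_cols: per-column specs + whether an integer PK sits at pk_idx 0."""
--     specs = []
--     has_int_pk0 = False
--     for col_name in insert_cols:
--         ft = _resolve_type(fields_list, col_name)
--         if ft is None:
--             continue
--         if (not first_pk_is_identity) and col_name in pk_cols:
--             pk_idx = pk_cols.index(col_name)
--             if 'VARCHAR' in ft.upper():  # NVARCHAR contains VARCHAR
--                 specs.append(('vpk', '', pk_idx))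
--             else:
--                 specs.append(('ipk', '', pk_idx))
--                 if pk_idx == 0:
--                     has_int_pk0 = True
--         else:
--             specs.append(('const', get_value_for_type(ft, col_name, prefix), 0))
--     return specs, has_int_pk0
--
--
-- def _apply_spec(spec, record_num, test_id_base, prefix):
--     kind, const_val, idx = spec
--     if kind == 'const':
--         return const_val
--     if kind == 'vpk':
--         return f"'{prefix}_{record_num}_{idx}'" if idx > 0 else f"'{prefix}_{record_num}'"
--     return str(test_id_base + record_num + idx)
--
--
-- def generate_insert_values(table_def, pk_cols, insert_cols,
--                            first_pk_is_identity, test_id_base, num_records,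
--                            prefix='CDCTest'):
--     raw_fields = table_def.get('fields') or table_def.get('columns', [])
--     fields_list = raw_fields if isinstance(raw_fields, list) else []
--
--     specs, has_int_pk0 = _build_specs(fields_list, pk_cols, insert_cols,
--                                       first_pk_is_identity, prefix)
--
--     all_value_sets = [
--         "(" + ", ".join(_apply_spec(s, r, test_id_base, prefix) for s in specs) + ")"
--         for r in range(num_records)
--     ]
--     if has_int_pk0 and num_records > 0:
--         return all_value_sets, test_id_base, test_id_base + num_records - 1
--     return all_value_sets, None, None
-- ===== Notes on version B (the rewrite author's own statement) =====
-- stated objective: faster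
-- what changed: B resolves each insert column once into a spec (constant string / varchar-PK / int-PK) and then maps the specs over the records, instead of A's per-record re-scan of the field list and inline first/last-PK mutation; first/last PK become a closed form from 'some spec is an int PK at index 0' and num_records.
import Mathlib
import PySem

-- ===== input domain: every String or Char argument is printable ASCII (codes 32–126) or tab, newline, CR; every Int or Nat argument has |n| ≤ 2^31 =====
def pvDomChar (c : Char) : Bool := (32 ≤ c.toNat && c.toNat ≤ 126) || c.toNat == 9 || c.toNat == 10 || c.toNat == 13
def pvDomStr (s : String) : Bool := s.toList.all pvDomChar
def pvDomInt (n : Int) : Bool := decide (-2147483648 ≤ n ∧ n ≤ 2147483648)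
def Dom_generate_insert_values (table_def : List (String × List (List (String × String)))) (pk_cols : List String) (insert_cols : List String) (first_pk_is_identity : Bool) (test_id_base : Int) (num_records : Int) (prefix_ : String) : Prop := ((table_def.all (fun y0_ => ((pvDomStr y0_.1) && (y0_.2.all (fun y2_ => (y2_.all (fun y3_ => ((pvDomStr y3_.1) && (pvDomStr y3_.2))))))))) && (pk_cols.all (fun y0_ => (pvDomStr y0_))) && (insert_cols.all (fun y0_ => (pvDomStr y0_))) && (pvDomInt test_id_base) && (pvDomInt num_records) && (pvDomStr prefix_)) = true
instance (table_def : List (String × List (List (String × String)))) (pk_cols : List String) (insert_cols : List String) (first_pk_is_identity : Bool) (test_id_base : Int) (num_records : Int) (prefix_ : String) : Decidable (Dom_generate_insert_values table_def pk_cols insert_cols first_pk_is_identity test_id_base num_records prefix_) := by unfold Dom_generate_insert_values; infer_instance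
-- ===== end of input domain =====

-- B resolves each insert column ONCE into a spec (constant / varchar-PK / int-PK) and maps the
-- specs over the records (dropping the per-record field-list rescans); first/last PK become a
-- closed form. Objective: faster (measured).

-- ===== PORT A =====

-- str(field.get('mssql') or field.get('name') or '')
def pvFieldName (field : List (String × String)) : String :=
  let m := (PySem.Dict.mk field).getD "mssql" ""
  if m ≠ "" then m
  else
    let n := (PySem.Dict.mk field).getD "name" ""
    if n ≠ "" then n else ""

-- str(field.get('type', ''))
def pvFieldType (field : List (String × String)) : String :=
  (PySem.Dict.mk field).getD "type" ""

-- get_value_for_type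
def pvGetValueForType (field_type : String) (col_name : String) (prefix_ : String) : String :=
  let ft := PySem.Str.upper field_type
  if PySem.Str.isIn "VARCHAR" ft || PySem.Str.isIn "NVARCHAR" ft || PySem.Str.isIn "CHAR" ft then
    "'" ++ prefix_ ++ "_" ++ col_name ++ "'"
  else if PySem.Str.isIn "INT" ft || PySem.Str.isIn "NUMERIC" ft || PySem.Str.isIn "DECIMAL" ft then "1"
  else if PySem.Str.isIn "BIT" ft then "0"
  else if PySem.Str.isIn "DATETIME" ft || PySem.Str.isIn "DATE" ft then "GETDATE()"
  else "NULL"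

-- A's inner 'for field in fields_list: … break' scan: first matching field's type
def pvAFind : List (List (String × String)) → String → Option String
  | [], _ => none
  | f :: rest, col => if pvFieldName f = col then some (pvFieldType f) else pvAFind rest col

-- raw_fields = table_def.get('fields') or table_def.get('columns', [])
def pvAFields (table_def : List (String × List (List (String × String)))) : List (List (String × String)) :=
  match (PySem.Dict.mk table_def).get? "fields" with
  | some l => if l ≠ [] then l else (PySem.Dict.mk table_def).getD "columns" []
  | none => (PySem.Dict.mk table_def).getD "columns" []

-- loop body over insert_cols, identity branch (state: record_vals)
def pvAColStepId (fl : List (List (String × String))) (prefix_ : String)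
    (rv : List String) (col : String) : List String :=
  match pvAFind fl col with
  | some ft => rv ++ [pvGetValueForType ft col prefix_]
  | none => rv

-- loop body over insert_cols, non-identity branch (state: record_vals, first_pk_val, last_pk_val)
def pvAColStep (fl : List (List (String × String))) (pk_cols : List String)
    (test_id_base num_records record_num : Int) (prefix_ : String)
    (acc : List String × Option Int × Option Int) (col : String) :
    List String × Option Int × Option Int :=
  let test_id := test_id_base + record_num
  if col ∈ pk_cols then
    let pk_idx : Int := (((PySem.List.index? pk_cols col).getD 0 : Nat) : Int)
    match pvAFind fl col with
    | some ft =>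
      if PySem.Str.isIn "VARCHAR" (PySem.Str.upper ft) || PySem.Str.isIn "NVARCHAR" (PySem.Str.upper ft) then
        let val := if pk_idx > 0
          then "'" ++ prefix_ ++ "_" ++ PySem.Int.toStr record_num ++ "_" ++ PySem.Int.toStr pk_idx ++ "'"
          else "'" ++ prefix_ ++ "_" ++ PySem.Int.toStr record_num ++ "'"
        (acc.1 ++ [val], acc.2.1, acc.2.2)
      else
        let val_int := if pk_idx > 0 then test_id + pk_idx else test_id
        let fpv := if pk_idx = 0 then (if record_num = 0 then some val_int else acc.2.1) else acc.2.1
        let lpv := if pk_idx = 0 then (if record_num = num_records - 1 then some val_int else acc.2.2) else acc.2.2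
        (acc.1 ++ [PySem.Int.toStr val_int], fpv, lpv)
    | none => acc
  else
    match pvAFind fl col with
    | some ft => (acc.1 ++ [pvGetValueForType ft col prefix_], acc.2.1, acc.2.2)
    | none => acc

-- A's body of 'for record_num in range(num_records)'
def pvAStep (fl : List (List (String × String))) (pk_cols insert_cols : List String)
    (first_pk_is_identity : Bool) (test_id_base num_records : Int) (prefix_ : String)
    (st : List String × Option Int × Option Int) (record_num : Int) :
    List String × Option Int × Option Int :=
  if first_pk_is_identity then
    let record_vals := insert_cols.foldl (pvAColStepId fl prefix_) []
    (st.1 ++ ["(" ++ PySem.Str.join ", " record_vals ++ ")"], st.2.1, st.2.2)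
  else
    let inner := insert_cols.foldl
      (pvAColStep fl pk_cols test_id_base num_records record_num prefix_) ([], st.2.1, st.2.2)
    (st.1 ++ ["(" ++ PySem.Str.join ", " inner.1 ++ ")"], inner.2.1, inner.2.2)

def generate_insert_values (table_def : List (String × List (List (String × String)))) (pk_cols : List String) (insert_cols : List String) (first_pk_is_identity : Bool) (test_id_base : Int) (num_records : Int) (prefix_ : String) : List String × Option Int × Option Int :=
  let fl := pvAFields table_def
  (PySem.List.pyRange 0 num_records 1).foldl
    (pvAStep fl pk_cols insert_cols first_pk_is_identity test_id_base num_records prefix_)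
    ([], none, none)

-- ===== PORT B =====

inductive PVSpec where
  | const : String → PVSpec
  | vpk : Int → PVSpec
  | ipk : Int → PVSpec
deriving DecidableEq, Repr

-- _resolve_type
def pvBResolve : List (List (String × String)) → String → Option String
  | [], _ => none
  | f :: rest, col => if pvFieldName f = col then some (pvFieldType f) else pvBResolve rest col

-- loop body of _build_specs (state: specs, has_int_pk0)
def pvBStep (fl : List (List (String × String))) (pk_cols : List String)
    (first_pk_is_identity : Bool) (prefix_ : String)
    (acc : List PVSpec × Bool) (col : String) : List PVSpec × Bool :=
  match pvBResolve fl col with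
  | none => acc
  | some ft =>
    if first_pk_is_identity = false ∧ col ∈ pk_cols then
      let pk_idx : Int := (((PySem.List.index? pk_cols col).getD 0 : Nat) : Int)
      if PySem.Str.isIn "VARCHAR" (PySem.Str.upper ft) then
        (acc.1 ++ [PVSpec.vpk pk_idx], acc.2)
      else
        (acc.1 ++ [PVSpec.ipk pk_idx], acc.2 || decide (pk_idx = 0))
    else
      (acc.1 ++ [PVSpec.const (pvGetValueForType ft col prefix_)], acc.2)

-- _build_specs
def pvBSpecs (fl : List (List (String × String))) (pk_cols insert_cols : List String)
    (first_pk_is_identity : Bool) (prefix_ : String) : List PVSpec × Bool :=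
  insert_cols.foldl (pvBStep fl pk_cols first_pk_is_identity prefix_) ([], false)

-- _apply_spec
def pvBApply (test_id_base : Int) (prefix_ : String) (record_num : Int) : PVSpec → String
  | .const v => v
  | .vpk idx =>
      if idx > 0
      then "'" ++ prefix_ ++ "_" ++ PySem.Int.toStr record_num ++ "_" ++ PySem.Int.toStr idx ++ "'"
      else "'" ++ prefix_ ++ "_" ++ PySem.Int.toStr record_num ++ "'"
  | .ipk idx => PySem.Int.toStr (test_id_base + record_num + idx)

def pvBFields (table_def : List (String × List (List (String × String)))) : List (List (String × String)) :=
  match (PySem.Dict.mk table_def).get? "fields" with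
  | some l => if l ≠ [] then l else (PySem.Dict.mk table_def).getD "columns" []
  | none => (PySem.Dict.mk table_def).getD "columns" []

def generate_insert_values_alt (table_def : List (String × List (List (String × String)))) (pk_cols : List String) (insert_cols : List String) (first_pk_is_identity : Bool) (test_id_base : Int) (num_records : Int) (prefix_ : String) : List String × Option Int × Option Int :=
  let fl := pvBFields table_def
  let sp := pvBSpecs fl pk_cols insert_cols first_pk_is_identity prefix_
  let rows := (PySem.List.pyRange 0 num_records 1).map
    (fun r => "(" ++ PySem.Str.join ", " (sp.1.map (pvBApply test_id_base prefix_ r)) ++ ")")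
  if sp.2 = true ∧ num_records > 0 then
    (rows, some test_id_base, some (test_id_base + num_records - 1))
  else
    (rows, none, none)

-- ===== PRECONDITION & SPEC =====
def Spec_generate_insert_values (table_def : List (String × List (List (String × String)))) (pk_cols : List String) (insert_cols : List String) (first_pk_is_identity : Bool) (test_id_base : Int) (num_records : Int) (prefix_ : String) (out : List String × Option Int × Option Int) : Prop := out = generate_insert_values_alt table_def pk_cols insert_cols first_pk_is_identity test_id_base num_records prefix_
instance (table_def : List (String × List (List (String × String)))) (pk_cols : List String) (insert_cols : List String) (first_pk_is_identity : Bool) (test_id_base : Int) (num_records : Int) (prefix_ : String) (out : List String × Option Int × Option Int) : Decidable (Spec_generate_insert_values table_def pk_cols insert_cols first_pk_is_identity test_id_base num_records prefix_ out) := by unfold Spec_generate_insert_values; infer_instance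

-- ===== CLAIM (what is proved, stated in full; the proofs are below) =====
def Claim_equal_generate_insert_values : Prop := ∀ (table_def : List (String × List (List (String × String)))) (pk_cols : List String) (insert_cols : List String) (first_pk_is_identity : Bool) (test_id_base : Int) (num_records : Int) (prefix_ : String), Dom_generate_insert_values table_def pk_cols insert_cols first_pk_is_identity test_id_base num_records prefix_ → Spec_generate_insert_values table_def pk_cols insert_cols first_pk_is_identity test_id_base num_records prefix_ (generate_insert_values table_def pk_cols insert_cols first_pk_is_identity test_id_base num_records prefix_)

-- ===== LEMMAS AND PROOFS =====

lemma pv_resolve_eq (fl : List (List (String × String))) (col : String) :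
    pvBResolve fl col = pvAFind fl col := by
  induction fl with
  | nil => rfl
  | cons f rest ih => simp [pvBResolve, pvAFind, ih]

-- 'VARCHAR' is a substring of 'NVARCHAR', so A's two-test disjunction is B's single test
lemma pv_varchar_or (l : List Char) :
    (PySem.Chars.isIn ['V','A','R','C','H','A','R'] l = true ∨
      PySem.Chars.isIn ['N','V','A','R','C','H','A','R'] l = true)
    ↔ PySem.Chars.isIn ['V','A','R','C','H','A','R'] l = true := by
  constructor
  · rintro (h | h)
    · exact h
    · exact (PySem.Chars.isIn_iff_infix _ _).mpr
        ((by decide : ['V','A','R','C','H','A','R'] <:+: ['N','V','A','R','C','H','A','R']).trans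
          ((PySem.Chars.isIn_iff_infix _ _).mp h))
  · exact Or.inl

-- generalized-accumulator form of pvBSpecs
lemma pv_bspecs_acc (fl : List (List (String × String))) (pk_cols : List String)
    (idy : Bool) (prefix_ : String) :
    ∀ (cols : List String) (s : List PVSpec) (b : Bool),
      cols.foldl (pvBStep fl pk_cols idy prefix_) (s, b)
        = (s ++ (pvBSpecs fl pk_cols cols idy prefix_).1,
           b || (pvBSpecs fl pk_cols cols idy prefix_).2) := by
  intro cols
  induction cols with
  | nil => intro s b; simp [pvBSpecs]
  | cons c cs ih =>
    intro s b
    show cs.foldl (pvBStep fl pk_cols idy prefix_) (pvBStep fl pk_cols idy prefix_ (s, b) c) = _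
    have hspec : pvBSpecs fl pk_cols (c :: cs) idy prefix_
        = cs.foldl (pvBStep fl pk_cols idy prefix_) (pvBStep fl pk_cols idy prefix_ ([], false) c) := rfl
    rcases hstep : pvBStep fl pk_cols idy prefix_ (s, b) c with ⟨s1, b1⟩
    rcases hstep0 : pvBStep fl pk_cols idy prefix_ ([], false) c with ⟨s0, b0⟩
    have hrel : s1 = s ++ s0 ∧ b1 = (b || b0) := by
      simp only [pvBStep] at hstep hstep0
      rcases hres : pvBResolve fl c with _ | ft <;> simp [hres] at hstep hstep0
      · exact ⟨by simp [← hstep.1, ← hstep0.1], by simp [← hstep.2, ← hstep0.2]⟩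
      · split_ifs at hstep hstep0 with h1 h2 <;>
          simp at hstep hstep0 <;>
          constructor <;> simp [← hstep.1, ← hstep0.1, ← hstep.2, ← hstep0.2]
    rw [ih, hspec, hstep0, ih]
    simp [hrel.1, hrel.2, Bool.or_assoc]

lemma pv_bspecs_cons (fl : List (List (String × String))) (pk_cols : List String)
    (idy : Bool) (prefix_ : String) (c : String) (cs : List String) :
    pvBSpecs fl pk_cols (c :: cs) idy prefix_
      = ((pvBStep fl pk_cols idy prefix_ ([], false) c).1 ++ (pvBSpecs fl pk_cols cs idy prefix_).1,
         (pvBStep fl pk_cols idy prefix_ ([], false) c).2 || (pvBSpecs fl pk_cols cs idy prefix_).2) := by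
  show List.foldl _ _ cs = _
  rw [pv_bspecs_acc]

-- identity branch: inner fold = map of const specs, and has_int_pk0 stays false
lemma pv_inner_id (fl : List (List (String × String))) (pk_cols : List String)
    (test_id_base : Int) (prefix_ : String) (r : Int) :
    ∀ (cols : List String) (rv : List String),
      cols.foldl (pvAColStepId fl prefix_) rv
        = rv ++ (pvBSpecs fl pk_cols cols true prefix_).1.map (pvBApply test_id_base prefix_ r) := by
  intro cols
  induction cols with
  | nil => intro rv; simp [pvBSpecs]
  | cons c cs ih =>
    intro rv
    rw [List.foldl_cons, ih, pv_bspecs_cons]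
    simp only [pvAColStepId, pvBStep, pv_resolve_eq]
    rcases hres : pvAFind fl c with _ | ft
    · simp
    · simp [pvBApply]

lemma pv_bspecs_id_false (fl : List (List (String × String))) (pk_cols : List String)
    (prefix_ : String) (cols : List String) :
    (pvBSpecs fl pk_cols cols true prefix_).2 = false := by
  induction cols with
  | nil => rfl
  | cons c cs ih =>
    rw [pv_bspecs_cons, ih]
    simp only [pvBStep]
    rcases hres : pvBResolve fl c with _ | ft <;> simp

-- non-identity branch: inner fold = map of specs; first/last updated iff an int PK at index 0
lemma pv_inner (fl : List (List (String × String))) (pk_cols : List String)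
    (test_id_base num_records : Int) (prefix_ : String) (r : Int) :
    ∀ (cols : List String) (rv : List String) (fpv lpv : Option Int),
      cols.foldl (pvAColStep fl pk_cols test_id_base num_records r prefix_) (rv, fpv, lpv)
        = (rv ++ (pvBSpecs fl pk_cols cols false prefix_).1.map (pvBApply test_id_base prefix_ r),
           if (pvBSpecs fl pk_cols cols false prefix_).2 = true ∧ r = 0
             then some (test_id_base + r) else fpv,
           if (pvBSpecs fl pk_cols cols false prefix_).2 = true ∧ r = num_records - 1
             then some (test_id_base + r) else lpv) := by
  intro cols
  induction cols with
  | nil => intro rv fpv lpv; simp [pvBSpecs]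
  | cons c cs ih =>
    intro rv fpv lpv
    rw [List.foldl_cons, pv_bspecs_cons]
    simp only [pvAColStep, pvBStep, pv_resolve_eq]
    rcases hres : pvAFind fl c with _ | ft
    · by_cases hmem : c ∈ pk_cols <;> simp [hmem, ih]
    · by_cases hmem : c ∈ pk_cols
      · by_cases hv : PySem.Chars.isIn ['V','A','R','C','H','A','R'] (PySem.Chars.upper ft.toList) = true
        · simp [hmem, hv, ih, pvBApply]
        · have hnv : PySem.Chars.isIn ['N','V','A','R','C','H','A','R'] (PySem.Chars.upper ft.toList) = false := by
            cases h2 : PySem.Chars.isIn ['N','V','A','R','C','H','A','R'] (PySem.Chars.upper ft.toList) with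
            | false => rfl
            | true => exact absurd ((pv_varchar_or _).mp (Or.inr h2)) hv
          by_cases h0 : (List.idxOf? c pk_cols).getD 0 = 0
          · by_cases hr0 : r = 0
            · subst hr0
              by_cases hrl : (0 : Int) = num_records - 1
              · by_cases hb : (pvBSpecs fl pk_cols cs false prefix_).2 = true <;>
                  simp [hmem, hv, hnv, h0, hb, ih, pvBApply, ← hrl]
              · by_cases hb : (pvBSpecs fl pk_cols cs false prefix_).2 = true <;>
                  simp [hmem, hv, hnv, h0, hb, ih, pvBApply, hrl]
            · by_cases hrl : r = num_records - 1
              · subst hrl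
                by_cases hb : (pvBSpecs fl pk_cols cs false prefix_).2 = true <;>
                  simp [hmem, hv, hnv, h0, hb, ih, pvBApply, hr0]
              · by_cases hb : (pvBSpecs fl pk_cols cs false prefix_).2 = true <;>
                  simp [hmem, hv, hnv, h0, hb, ih, pvBApply, hr0, hrl]
          · have hpos : 0 < (List.idxOf? c pk_cols).getD 0 := by omega
            simp [hmem, hv, hnv, h0, hpos, ih, pvBApply]
      · simp [hmem, ih, pvBApply]

-- one record step, both branches, in terms of B's specs
lemma pv_step (fl : List (List (String × String))) (pk_cols insert_cols : List String)
    (idy : Bool) (test_id_base num_records : Int) (prefix_ : String) (r : Int)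
    (st : List String × Option Int × Option Int) :
    pvAStep fl pk_cols insert_cols idy test_id_base num_records prefix_ st r
      = (st.1 ++ ["(" ++ PySem.Str.join ", "
            ((pvBSpecs fl pk_cols insert_cols idy prefix_).1.map (pvBApply test_id_base prefix_ r)) ++ ")"],
         if (pvBSpecs fl pk_cols insert_cols idy prefix_).2 = true ∧ r = 0
           then some (test_id_base + r) else st.2.1,
         if (pvBSpecs fl pk_cols insert_cols idy prefix_).2 = true ∧ r = num_records - 1
           then some (test_id_base + r) else st.2.2) := by
  cases idy with
  | true =>
    simp only [pvAStep, if_pos]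
    rw [pv_inner_id fl pk_cols test_id_base prefix_ r]
    simp [pv_bspecs_id_false]
  | false =>
    simp only [pvAStep, Bool.false_eq_true, if_false]
    rw [pv_inner]
    simp

-- fold over the tail range [a, num_records): rows append; first/last hit at r = 0 / num_records-1
lemma pv_outer (fl : List (List (String × String))) (pk_cols insert_cols : List String)
    (idy : Bool) (test_id_base num_records : Int) (prefix_ : String) :
    ∀ (k : Nat) (a : Int), 0 ≤ a → num_records - a ≤ (k : Int) →
    ∀ (avs : List String) (fpv lpv : Option Int),
      (PySem.List.pyRange a num_records 1).foldl
          (pvAStep fl pk_cols insert_cols idy test_id_base num_records prefix_) (avs, fpv, lpv)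
        = (avs ++ (PySem.List.pyRange a num_records 1).map (fun r =>
              "(" ++ PySem.Str.join ", "
                ((pvBSpecs fl pk_cols insert_cols idy prefix_).1.map (pvBApply test_id_base prefix_ r)) ++ ")"),
           if (pvBSpecs fl pk_cols insert_cols idy prefix_).2 = true ∧ a = 0 ∧ 0 < num_records
             then some test_id_base else fpv,
           if (pvBSpecs fl pk_cols insert_cols idy prefix_).2 = true ∧ a < num_records
             then some (test_id_base + (num_records - 1)) else lpv) := by
  intro k
  induction k with
  | zero =>
    intro a ha hk avs fpv lpv
    have hnil : PySem.List.pyRange a num_records 1 = [] :=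
      PySem.List.pyRange_one_eq_nil (by omega)
    rw [hnil]
    have h1 : ¬ ((pvBSpecs fl pk_cols insert_cols idy prefix_).2 = true ∧ a = 0 ∧ 0 < num_records) := by
      rintro ⟨-, rfl, h⟩; omega
    have h2 : ¬ ((pvBSpecs fl pk_cols insert_cols idy prefix_).2 = true ∧ a < num_records) := by
      rintro ⟨-, h⟩; omega
    simp [h1, h2]
  | succ k ih =>
    intro a ha hk avs fpv lpv
    by_cases hlt : a < num_records
    · rw [PySem.List.pyRange_one_cons hlt, List.foldl_cons, pv_step,
        ih (a + 1) (by omega) (by omega)]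
      refine Prod.ext ?_ (Prod.ext ?_ ?_)
      · simp
      · have h1 : ¬ (a + 1 = 0) := by omega
        by_cases hza : a = 0
        · subst hza
          have hn : (0 : Int) < num_records := hlt
          simp [hn]
        · simp [h1, hza]
      · by_cases hstop : a + 1 < num_records
        · have hne : ¬ (a = num_records - 1) := by omega
          simp [hstop, hlt, hne]
        · have hlast : a = num_records - 1 := by omega
          subst hlast
          have h2 : num_records - 1 < num_records := by omega
          simp [h2]
    · have hnil : PySem.List.pyRange a num_records 1 = [] :=
        PySem.List.pyRange_one_eq_nil (by omega)
      have h1 : ¬ ((pvBSpecs fl pk_cols insert_cols idy prefix_).2 = true ∧ a = 0 ∧ 0 < num_records) := by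
        rintro ⟨-, rfl, h⟩; omega
      simp [hnil, h1, hlt]

-- ===== VERDICT (by name: the statement is the Claim_ definition above) =====
theorem generate_insert_values_spec : Claim_equal_generate_insert_values := by
  intro table_def pk_cols insert_cols idy test_id_base num_records prefix_ _
  show generate_insert_values _ _ _ _ _ _ _ = generate_insert_values_alt _ _ _ _ _ _ _
  unfold generate_insert_values generate_insert_values_alt
  have hfl : pvBFields table_def = pvAFields table_def := rfl
  rw [hfl]
  rw [pv_outer (pvAFields table_def) pk_cols insert_cols idy test_id_base num_records prefix_
      (num_records.toNat) 0 le_rfl (by omega) [] none none]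
  by_cases hb : (pvBSpecs (pvAFields table_def) pk_cols insert_cols idy prefix_).2 = true
  · by_cases hn : 0 < num_records
    · have he : test_id_base + (num_records - 1) = test_id_base + num_records - 1 := by omega
      simp [hb, hn, he]
    · simp [hb, hn]
  · simp [hb]
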